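-- pv_equiv track=rewrite | github.com/grapheneaffiliate/h4-polytopic-attention | solve_arc_b24.py | solve_e50d258f
-- ===== SOURCE A (Python) =====
-- def solve_e50d258f(grid):
--     """Find rectangular block with most 2s among separated non-zero blocks."""
--     R, C = len(grid), len(grid[0])
--     visited = set()
--     blocks = []
--     for r in range(R):
--         for c in range(C):
--             if grid[r][c]!=0 and (r,c) not in visited:
--                 comp = []
--                 stack = [(r,c)]
--                 while stack:
--                     cr,cc = stack.pop()
--                     if (cr,cc) in visited or grid[cr][cc]==0: continue
--                     visited.add((cr,cc))
--                     comp.append((cr,cc))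
--                     for dr,dc in [(-1,0),(1,0),(0,-1),(0,1)]:
--                         nr,nc=cr+dr,cc+dc
--                         if 0<=nr<R and 0<=nc<C and (nr,nc) not in visited and grid[nr][nc]!=0:
--                             stack.append((nr,nc))
--                 blocks.append(comp)
--
--     best = None
--     best_score = -1
--     for block in blocks:
--         count_2 = sum(1 for r,c in block if grid[r][c]==2)
--         if count_2 > best_score:
--             best_score = count_2
--             min_r = min(r for r,c in block)
--             max_r = max(r for r,c in block)
--             min_c = min(c for r,c in block)
--             max_c = max(c for r,c in block)
--             best = [[grid[r][c] for c in range(min_c,max_c+1)] for r in range(min_r,max_r+1)]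
--     return best
-- ===== SOURCE B (Python) =====
-- def solve_e50d258f(grid):
--     """Find rectangular block with most 2s among separated non-zero blocks.
--
--     Alternative algorithm: no global visited set / flood-fill stack.  For each
--     cell, its connected component is computed independently as the fixpoint of
--     repeated neighbourhood dilation; a component is processed exactly once, at
--     its row-major-smallest cell, and the best block is selected in one streaming
--     pass over the grid.
--     """
--     R, C = len(grid), len(grid[0])
--
--     def component(p):
--         comp = {p}
--         for _ in range(R * C):
--             frontier = set()
--             for (r, c) in comp:
--                 for nr, nc in ((r - 1, c), (r + 1, c), (r, c - 1), (r, c + 1)):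
--                     if 0 <= nr < R and 0 <= nc < C and grid[nr][nc] != 0:
--                         frontier.add((nr, nc))
--             comp |= frontier
--         return comp
--
--     best = None
--     best_score = -1
--     for r in range(R):
--         for c in range(C):
--             if grid[r][c] != 0:
--                 comp = component((r, c))
--                 if min(comp) == (r, c):
--                     count_2 = sum(1 for (x, y) in comp if grid[x][y] == 2)
--                     if count_2 > best_score:
--                         best_score = count_2
--                         min_r = min(x for x, y in comp)
--                         max_r = max(x for x, y in comp)
--                         min_c = min(y for x, y in comp)
--                         max_c = max(y for x, y in comp)
--                         best = [[grid[i][j] for j in range(min_c, max_c + 1)]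
--                                 for i in range(min_r, max_r + 1)]
--     return best
-- ===== Notes on version B (the rewrite author's own statement) =====
-- stated objective: alternative
-- what changed: Replaces A's global-visited-set flood fill (explicit stack DFS collecting a blocks list, then a second selection pass) by an independent per-cell connected-component computation via iterated neighbourhood dilation to a fixpoint, processing each component exactly once at its row-major-minimal cell and selecting the best block in the same streaming pass.
import Mathlib
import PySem

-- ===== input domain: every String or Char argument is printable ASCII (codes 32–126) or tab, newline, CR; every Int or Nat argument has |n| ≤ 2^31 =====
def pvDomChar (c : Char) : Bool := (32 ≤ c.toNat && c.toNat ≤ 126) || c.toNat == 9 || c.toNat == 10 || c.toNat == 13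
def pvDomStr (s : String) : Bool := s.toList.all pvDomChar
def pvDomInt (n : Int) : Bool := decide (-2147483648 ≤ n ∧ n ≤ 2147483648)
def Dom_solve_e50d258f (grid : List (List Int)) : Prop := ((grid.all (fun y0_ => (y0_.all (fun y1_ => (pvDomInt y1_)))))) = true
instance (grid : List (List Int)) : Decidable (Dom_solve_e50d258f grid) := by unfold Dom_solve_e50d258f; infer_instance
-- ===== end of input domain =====

-- B replaces A's global-visited-set flood fill by an independent per-cell fixpoint
-- (repeated neighbourhood dilation) with a row-major-minimum canonicity test and a
-- single streaming selection pass (objective: alternative algorithm, not faster).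

-- Shared helpers (identical Python lines in both sources): grid access, min/max of a
-- nonempty int generator, the per-block "count 2s and build bounding box" selection step.
def pvRg (grid : List (List Int)) : Int := grid.length
def pvCg (grid : List (List Int)) : Int := (PySem.List.pyGetD grid 0 []).length
def cellVal (grid : List (List Int)) (r c : Int) : Int :=
  PySem.List.pyGetD (PySem.List.pyGetD grid r []) c 0
def listMinI (l : List Int) : Int := match l with | [] => 0 | x :: t => t.foldl min x
def listMaxI (l : List Int) : Int := match l with | [] => 0 | x :: t => t.foldl max x
def count2Of (grid : List (List Int)) (cells : List (Int × Int)) : Int :=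
  ((cells.filter (fun p => cellVal grid p.1 p.2 == 2)).length : Int)
def bboxOf (grid : List (List Int)) (cells : List (Int × Int)) : List (List Int) :=
  let min_r := listMinI (cells.map Prod.fst)
  let max_r := listMaxI (cells.map Prod.fst)
  let min_c := listMinI (cells.map Prod.snd)
  let max_c := listMaxI (cells.map Prod.snd)
  (PySem.List.pyRange min_r (max_r + 1) 1).map (fun i =>
    (PySem.List.pyRange min_c (max_c + 1) 1).map (fun j => cellVal grid i j))
def selStep (grid : List (List Int)) (st : Option (List (List Int)) × Int)
    (cells : List (Int × Int)) : Option (List (List Int)) × Int :=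
  let count_2 := count2Of grid cells
  if count_2 > st.2 then (some (bboxOf grid cells), count_2) else st

-- ===== PORT A ===== (explicit-stack flood fill over a global visited set, then a
-- second pass over the collected blocks; the while loop carries fuel, which is
-- proved sufficient below — it only makes the same computation total)
def dfsLoop (grid : List (List Int)) (R C : Int) :
    Nat → PySem.Set (Int × Int) → List (Int × Int) → List (Int × Int) →
    PySem.Set (Int × Int) × List (Int × Int) × List (Int × Int)
  | 0, visited, comp, stack => (visited, comp, stack)
  | Nat.succ fuel, visited, comp, stack =>
    match stack with
    | [] => (visited, comp, [])
    | (cr, cc) :: rest =>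
      if (cr, cc) ∈ visited ∨ cellVal grid cr cc = 0 then
        dfsLoop grid R C fuel visited comp rest
      else
        let visited' := PySem.Set.add visited (cr, cc)
        let comp' := comp ++ [(cr, cc)]
        let stack' := [((-1 : Int), (0 : Int)), (1, 0), (0, -1), (0, 1)].foldl
          (fun st d =>
            let nr := cr + d.1
            let nc := cc + d.2
            if 0 ≤ nr ∧ nr < R ∧ 0 ≤ nc ∧ nc < C ∧ (nr, nc) ∉ visited' ∧
                cellVal grid nr nc ≠ 0 then
              (nr, nc) :: st
            else st) rest
        dfsLoop grid R C fuel visited' comp' stack'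

def solve_e50d258f (grid : List (List Int)) : Option (List (List Int)) :=
  let R := pvRg grid
  let C := pvCg grid
  let scanned :=
    (PySem.List.pyRange 0 R 1).foldl (fun s r =>
      (PySem.List.pyRange 0 C 1).foldl
        (fun (s : PySem.Set (Int × Int) × List (List (Int × Int))) c =>
          if cellVal grid r c ≠ 0 ∧ (r, c) ∉ s.1 then
            let res := dfsLoop grid R C (5 * (R * C).toNat + 1) s.1 [] [(r, c)]
            (res.1, s.2 ++ [res.2.1])
          else s) s)
      ((PySem.Set.empty : PySem.Set (Int × Int)), ([] : List (List (Int × Int))))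
  (scanned.2.foldl (fun st block => selStep grid st block)
    ((none : Option (List (List Int))), (-1 : Int))).1

-- ===== PORT B ===== (no visited set, no stack: each cell's component is the fixpoint
-- of neighbourhood dilation, a component is handled once — at its lexicographically
-- least cell — and the best block is selected in the same streaming pass)
def bStep (grid : List (List Int)) (R C : Int) (comp : PySem.Set (Int × Int)) :
    PySem.Set (Int × Int) :=
  let frontier := comp.foldl (fun fr p =>
      [(p.1 - 1, p.2), (p.1 + 1, p.2), (p.1, p.2 - 1), (p.1, p.2 + 1)].foldl
        (fun fr q =>
          if 0 ≤ q.1 ∧ q.1 < R ∧ 0 ≤ q.2 ∧ q.2 < C ∧ cellVal grid q.1 q.2 ≠ 0 then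
            PySem.Set.add fr q
          else fr) fr)
    (PySem.Set.empty : PySem.Set (Int × Int))
  PySem.Set.union comp frontier

def componentB (grid : List (List Int)) (R C : Int) (p : Int × Int) :
    PySem.Set (Int × Int) :=
  (PySem.List.pyRange 0 (R * C) 1).foldl (fun comp _ => bStep grid R C comp)
    (PySem.Set.ofList [p])

def lexMinP (l : List (Int × Int)) : Int × Int :=
  match l with
  | [] => (0, 0)
  | x :: t => t.foldl (fun a b => if b.1 < a.1 ∨ (b.1 = a.1 ∧ b.2 < a.2) then b else a) x

def solve_e50d258f_alt (grid : List (List Int)) : Option (List (List Int)) :=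
  let R := pvRg grid
  let C := pvCg grid
  ((PySem.List.pyRange 0 R 1).foldl (fun st r =>
      (PySem.List.pyRange 0 C 1).foldl
        (fun (st : Option (List (List Int)) × Int) c =>
          if cellVal grid r c ≠ 0 then
            let comp := componentB grid R C (r, c)
            if lexMinP comp = (r, c) then selStep grid st comp else st
          else st) st)
    ((none : Option (List (List Int))), (-1 : Int))).1

-- ===== PRECONDITION & SPEC =====
-- Pre_ excludes exactly the inputs on which the Python A raises IndexError:
-- the empty grid (grid[0]) and grids with a row shorter than the first row
-- (grid[r][c] is read for every c < len(grid[0])). Nothing else is excluded.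
def Pre_solve_e50d258f (grid : List (List Int)) : Prop :=
  grid ≠ [] ∧ ∀ row ∈ grid, (PySem.List.pyGetD grid 0 []).length ≤ row.length
instance (grid : List (List Int)) : Decidable (Pre_solve_e50d258f grid) := by
  unfold Pre_solve_e50d258f; infer_instance
def pvWitness_solve_e50d258f : List (List Int) := [[1, 2, 0], [0, 2, 0], [0, 0, 3]]
def Spec_solve_e50d258f (grid : List (List Int)) (out : Option (List (List Int))) : Prop :=
  out = solve_e50d258f_alt grid
instance (grid : List (List Int)) (out : Option (List (List Int))) :
    Decidable (Spec_solve_e50d258f grid out) := by unfold Spec_solve_e50d258f; infer_instance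

-- ===== CLAIM (what is proved, stated in full; the proofs are below) =====
def Claim_equal_solve_e50d258f : Prop := ∀ (grid : List (List Int)),
  Dom_solve_e50d258f grid → Pre_solve_e50d258f grid →
  Spec_solve_e50d258f grid (solve_e50d258f grid)

-- ===== LEMMAS AND PROOFS =====

-- abstract vocabulary: valid cells, adjacency, connectivity, row-major (lex) order
abbrev inRc (grid : List (List Int)) (p : Int × Int) : Prop :=
  0 ≤ p.1 ∧ p.1 < pvRg grid ∧ 0 ≤ p.2 ∧ p.2 < pvCg grid
def okc (grid : List (List Int)) (p : Int × Int) : Prop :=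
  inRc grid p ∧ cellVal grid p.1 p.2 ≠ 0
def nbrs (p : Int × Int) : List (Int × Int) :=
  [(p.1 - 1, p.2), (p.1 + 1, p.2), (p.1, p.2 - 1), (p.1, p.2 + 1)]
def adjc (grid : List (List Int)) (p q : Int × Int) : Prop :=
  okc grid p ∧ okc grid q ∧ q ∈ nbrs p
def Connc (grid : List (List Int)) : (Int × Int) → (Int × Int) → Prop :=
  Relation.ReflTransGen (adjc grid)
def lexLt (p q : Int × Int) : Prop := p.1 < q.1 ∨ (p.1 = q.1 ∧ p.2 < q.2)
def positionsP (grid : List (List Int)) : List (Int × Int) :=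
  (PySem.List.pyRange 0 (pvRg grid) 1).flatMap (fun r =>
    (PySem.List.pyRange 0 (pvCg grid) 1).map (fun c => (r, c)))
-- B's per-cell test: nonzero and the lexicographic minimum of its own component
abbrev canonP (grid : List (List Int)) (p : Int × Int) : Prop :=
  cellVal grid p.1 p.2 ≠ 0 ∧ lexMinP (componentB grid (pvRg grid) (pvCg grid) p) = p

-- proof-side names for the two scan bodies (definitionally the ports' loop bodies)
def scanStep (grid : List (List Int))
    (s : PySem.Set (Int × Int) × List (List (Int × Int))) (p : Int × Int) :
    PySem.Set (Int × Int) × List (List (Int × Int)) :=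
  if cellVal grid p.1 p.2 ≠ 0 ∧ p ∉ s.1 then
    ((dfsLoop grid (pvRg grid) (pvCg grid) (5 * (pvRg grid * pvCg grid).toNat + 1)
        s.1 [] [p]).1,
      s.2 ++ [(dfsLoop grid (pvRg grid) (pvCg grid)
        (5 * (pvRg grid * pvCg grid).toNat + 1) s.1 [] [p]).2.1])
  else s

def selBStep (grid : List (List Int)) (st : Option (List (List Int)) × Int)
    (p : Int × Int) : Option (List (List Int)) × Int :=
  if cellVal grid p.1 p.2 ≠ 0 then
    if lexMinP (componentB grid (pvRg grid) (pvCg grid) p) = p then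
      selStep grid st (componentB grid (pvRg grid) (pvCg grid) p)
    else st
  else st

lemma adjc_symm (grid : List (List Int)) : Symmetric (adjc grid) := by
  intro p q h
  obtain ⟨hp, hq, hm⟩ := h
  refine ⟨hq, hp, ?_⟩
  obtain ⟨a, b⟩ := p; obtain ⟨c, d⟩ := q
  simp only [nbrs, List.mem_cons, List.mem_singleton, Prod.mk.injEq, List.not_mem_nil,
    or_false] at hm ⊢
  omega

lemma connc_symm (grid : List (List Int)) {p q : Int × Int} (h : Connc grid p q) :
    Connc grid q p := by
  exact Relation.ReflTransGen.symmetric (adjc_symm grid) h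

lemma okc_of_connc_ne (grid : List (List Int)) {p q : Int × Int}
    (h : Connc grid p q) (hne : q ≠ p) : okc grid q := by
  rcases (Relation.ReflTransGen.cases_tail h) with h1 | ⟨b, _, hadj⟩
  · exact absurd h1 hne
  · exact hadj.2.1

-- generic list facts
lemma nodup_subset_length {α : Type} {l1 l2 : List α} (h1 : l1.Nodup) (hs : l1 ⊆ l2) :
    l1.length ≤ l2.length := by
  exact (List.subperm_of_subset h1 hs).length_le

lemma foldl_forall2_congr {α β σ : Type} (Rel : α → β → Prop)
    (f : σ → α → σ) (g : σ → β → σ)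
    (hfg : ∀ s a b, Rel a b → f s a = g s b) :
    ∀ {l1 : List α} {l2 : List β}, List.Forall₂ Rel l1 l2 →
      ∀ s, l1.foldl f s = l2.foldl g s := by
  intro l1 l2 h
  induction h with
  | nil => intro s; rfl
  | cons hab h ih =>
    intro s
    simp only [List.foldl_cons]
    rw [hfg _ _ _ hab]
    exact ih _

lemma foldl_ignore_iterate {α β : Type} (f : α → α) :
    ∀ (l : List β) (init : α), l.foldl (fun c _ => f c) init = f^[l.length] init := by
  intro l
  induction l with
  | nil => intro init; rfl
  | cons a t ih =>
    intro init
    simp only [List.foldl_cons, List.length_cons]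
    rw [ih, Function.iterate_succ_apply]

lemma nested_foldl {σ : Type} (grid : List (List Int)) (f : σ → (Int × Int) → σ)
    (init : σ) :
    (PySem.List.pyRange 0 (pvRg grid) 1).foldl (fun s r =>
      (PySem.List.pyRange 0 (pvCg grid) 1).foldl (fun s c => f s (r, c)) s) init =
    (positionsP grid).foldl f init := by
  have h : ∀ (l1 : List Int) (init : σ),
      l1.foldl (fun s r =>
        (PySem.List.pyRange 0 (pvCg grid) 1).foldl (fun s c => f s (r, c)) s) init =
      ((l1.flatMap fun r =>
        (PySem.List.pyRange 0 (pvCg grid) 1).map fun c => (r, c)).foldl f init) := by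
    intro l1
    induction l1 with
    | nil => intro init; rfl
    | cons a t ih =>
      intro init
      simp only [List.foldl_cons, List.flatMap_cons, List.foldl_append]
      rw [ih, List.foldl_map]
  exact h _ init

-- positions facts
lemma mem_positionsP (grid : List (List Int)) (p : Int × Int) :
    p ∈ positionsP grid ↔ inRc grid p := by
  obtain ⟨a, b⟩ := p
  simp only [positionsP, List.mem_flatMap, List.mem_map, PySem.List.mem_pyRange_one,
    inRc, Prod.mk.injEq]
  constructor
  · rintro ⟨r, hr, c, hc, rfl, rfl⟩
    exact ⟨hr.1, hr.2, hc.1, hc.2⟩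
  · rintro ⟨h1, h2, h3, h4⟩
    exact ⟨a, ⟨h1, h2⟩, b, ⟨h3, h4⟩, rfl, rfl⟩

lemma pairwise_positionsP (grid : List (List Int)) :
    (positionsP grid).Pairwise lexLt := by
  have aux : ∀ (cols : List Int), cols.Pairwise (· < ·) → ∀ (rows : List Int),
      rows.Pairwise (· < ·) →
      (rows.flatMap fun r => cols.map fun c => ((r, c) : Int × Int)).Pairwise lexLt := by
    intro cols hc rows
    induction rows with
    | nil => intro _; simp
    | cons a t ih =>
      intro hr
      rcases List.pairwise_cons.mp hr with ⟨ha, ht⟩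
      simp only [List.flatMap_cons, List.pairwise_append]
      refine ⟨?_, ih ht, ?_⟩
      · rw [List.pairwise_map]
        exact hc.imp (fun h => Or.inr ⟨rfl, h⟩)
      · intro x hx y hy
        obtain ⟨cx, hcx, hx'⟩ := List.mem_map.mp hx
        obtain ⟨r', hr', hy1⟩ := List.mem_flatMap.mp hy
        obtain ⟨cy, hcy, hy'⟩ := List.mem_map.mp hy1
        rw [← hx', ← hy']
        exact Or.inl (ha r' hr')
  exact aux _ (PySem.List.pairwise_lt_pyRange_one 0 (pvCg grid)) _
    (PySem.List.pairwise_lt_pyRange_one 0 (pvRg grid))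

lemma length_positionsP (grid : List (List Int)) :
    (positionsP grid).length = (pvRg grid * pvCg grid).toNat := by
  simp only [positionsP, List.length_flatMap, List.length_map,
    PySem.List.length_pyRange_one, Int.sub_zero]
  rw [PySem.List.sum_map_const_nat, PySem.List.length_pyRange_one, Int.sub_zero]
  have hR : (0 : Int) ≤ pvRg grid := by simp [pvRg]
  have hC : (0 : Int) ≤ pvCg grid := by simp [pvCg]
  exact (Int.toNat_mul hR hC).symm

-- min/max-fold facts
lemma listMinI_spec (l : List Int) (h : l ≠ []) :
    listMinI l ∈ l ∧ ∀ y ∈ l, listMinI l ≤ y := by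
  match l, h with
  | x :: t, _ =>
    simp only [listMinI]
    obtain ⟨h1, h2⟩ := PySem.List.foldl_min_le t x
    rcases PySem.List.foldl_min_mem t x with hm | hm
    · exact ⟨by rw [hm]; exact List.mem_cons_self .., by
        intro y hy
        rcases List.mem_cons.mp hy with rfl | hy
        · exact h1
        · exact h2 y hy⟩
    · exact ⟨List.mem_cons_of_mem _ hm, by
        intro y hy
        rcases List.mem_cons.mp hy with rfl | hy
        · exact h1
        · exact h2 y hy⟩

lemma listMaxI_spec (l : List Int) (h : l ≠ []) :
    listMaxI l ∈ l ∧ ∀ y ∈ l, y ≤ listMaxI l := by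
  match l, h with
  | x :: t, _ =>
    simp only [listMaxI]
    obtain ⟨h1, h2⟩ := PySem.List.le_foldl_max t x
    rcases PySem.List.foldl_max_mem t x with hm | hm
    · exact ⟨by rw [hm]; exact List.mem_cons_self .., by
        intro y hy
        rcases List.mem_cons.mp hy with rfl | hy
        · exact h1
        · exact h2 y hy⟩
    · exact ⟨List.mem_cons_of_mem _ hm, by
        intro y hy
        rcases List.mem_cons.mp hy with rfl | hy
        · exact h1
        · exact h2 y hy⟩

lemma listMinI_congr {l1 l2 : List Int} (h1 : l1 ≠ []) (h2 : l2 ≠ [])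
    (hm : ∀ x, x ∈ l1 ↔ x ∈ l2) : listMinI l1 = listMinI l2 := by
  obtain ⟨m1, hall1⟩ := listMinI_spec l1 h1
  obtain ⟨m2, hall2⟩ := listMinI_spec l2 h2
  exact le_antisymm (hall1 _ ((hm _).mpr m2)) (hall2 _ ((hm _).mp m1))

lemma listMaxI_congr {l1 l2 : List Int} (h1 : l1 ≠ []) (h2 : l2 ≠ [])
    (hm : ∀ x, x ∈ l1 ↔ x ∈ l2) : listMaxI l1 = listMaxI l2 := by
  obtain ⟨m1, hall1⟩ := listMaxI_spec l1 h1
  obtain ⟨m2, hall2⟩ := listMaxI_spec l2 h2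
  exact le_antisymm (hall2 _ ((hm _).mp m1)) (hall1 _ ((hm _).mpr m2))

lemma lexfold_mem : ∀ (t : List (Int × Int)) (a : Int × Int),
    t.foldl (fun a b => if b.1 < a.1 ∨ (b.1 = a.1 ∧ b.2 < a.2) then b else a) a = a ∨
    t.foldl (fun a b => if b.1 < a.1 ∨ (b.1 = a.1 ∧ b.2 < a.2) then b else a) a ∈ t := by
  intro t
  induction t with
  | nil => intro a; exact Or.inl rfl
  | cons b t ih =>
    intro a
    simp only [List.foldl_cons]
    rcases ih (if b.1 < a.1 ∨ (b.1 = a.1 ∧ b.2 < a.2) then b else a) with h | h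
    · rw [h]
      split_ifs with hc
      · exact Or.inr (List.mem_cons_self ..)
      · exact Or.inl rfl
    · exact Or.inr (List.mem_cons_of_mem _ h)

lemma lexfold_min : ∀ (t : List (Int × Int)) (a y : Int × Int), (y = a ∨ y ∈ t) →
    ¬ lexLt y (t.foldl (fun a b => if b.1 < a.1 ∨ (b.1 = a.1 ∧ b.2 < a.2) then b else a) a) := by
  intro t
  induction t with
  | nil =>
    rintro a y (rfl | h)
    · simp only [List.foldl_nil, lexLt]
      omega
    · cases h
  | cons b t ih =>
    intro a y hy
    simp only [List.foldl_cons]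
    by_cases hc : b.1 < a.1 ∨ (b.1 = a.1 ∧ b.2 < a.2)
    · rw [if_pos hc]
      rcases hy with rfl | hy
      · -- y = a, and lexLt b a holds; fold result is min over b :: t
        have hnb := ih b b (Or.inl rfl)
        intro hlt
        apply hnb
        revert hlt
        generalize (t.foldl (fun a b => if b.1 < a.1 ∨ (b.1 = a.1 ∧ b.2 < a.2) then b else a) b) = m
        obtain ⟨m1, m2⟩ := m
        simp only [lexLt]
        omega
      · rcases List.mem_cons.mp hy with rfl | hy
        · exact ih y y (Or.inl rfl)
        · exact ih b y (Or.inr hy)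
    · rw [if_neg hc]
      rcases hy with rfl | hy
      · exact ih y y (Or.inl rfl)
      · rcases List.mem_cons.mp hy with rfl | hy
        · -- y = b, and ¬ lexLt b a: a is lex-≤ b, fold min of t from a
          have hna := ih a a (Or.inl rfl)
          intro hlt
          apply hna
          revert hlt
          generalize (t.foldl (fun a b => if b.1 < a.1 ∨ (b.1 = a.1 ∧ b.2 < a.2) then b else a) a) = m
          obtain ⟨m1, m2⟩ := m
          simp only [lexLt] at hc ⊢
          omega
        · exact ih a y (Or.inr hy)

lemma lexMinP_mem (x : Int × Int) (t : List (Int × Int)) :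
    lexMinP (x :: t) ∈ x :: t := by
  simp only [lexMinP]
  rcases lexfold_mem t x with h | h
  · rw [h]; exact List.mem_cons_self ..
  · exact List.mem_cons_of_mem _ h

lemma lexMinP_min (x : Int × Int) (t : List (Int × Int)) :
    ∀ y ∈ x :: t, ¬ lexLt y (lexMinP (x :: t)) := by
  intro y hy
  simp only [lexMinP]
  rcases List.mem_cons.mp hy with rfl | hy
  · exact lexfold_min t y y (Or.inl rfl)
  · exact lexfold_min t x y (Or.inr hy)

lemma selStep_congr (grid : List (List Int)) (st : Option (List (List Int)) × Int)
    {l1 l2 : List (Int × Int)} (h1 : l1 ≠ []) (h2 : l2 ≠ [])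
    (hn1 : l1.Nodup) (hn2 : l2.Nodup) (hm : ∀ x, x ∈ l1 ↔ x ∈ l2) :
    selStep grid st l1 = selStep grid st l2 := by
  have hperm : l1.Perm l2 := (List.perm_ext_iff_of_nodup hn1 hn2).mpr hm
  have hc : count2Of grid l1 = count2Of grid l2 := by
    simp only [count2Of, (hperm.filter _).length_eq]
  have hf : ∀ (g : Int × Int → Int) (x : Int), x ∈ l1.map g ↔ x ∈ l2.map g := by
    intro g x
    simp only [List.mem_map]
    constructor
    · rintro ⟨p, hp, rfl⟩; exact ⟨p, (hm p).mp hp, rfl⟩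
    · rintro ⟨p, hp, rfl⟩; exact ⟨p, (hm p).mpr hp, rfl⟩
  have hne1 : ∀ g : Int × Int → Int, l1.map g ≠ [] :=
    fun g h => h1 (List.map_eq_nil_iff.mp h)
  have hne2 : ∀ g : Int × Int → Int, l2.map g ≠ [] :=
    fun g h => h2 (List.map_eq_nil_iff.mp h)
  have hbb : bboxOf grid l1 = bboxOf grid l2 := by
    simp only [bboxOf]
    rw [listMinI_congr (hne1 _) (hne2 _) (hf Prod.fst),
      listMaxI_congr (hne1 _) (hne2 _) (hf Prod.fst),
      listMinI_congr (hne1 _) (hne2 _) (hf Prod.snd),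
      listMaxI_congr (hne1 _) (hne2 _) (hf Prod.snd)]
  simp only [selStep, hc, hbb]

-- ===== B-side: the dilation fixpoint computes connected components =====
lemma mem_innerFold (grid : List (List Int)) (p : Int × Int)
    (fr : PySem.Set (Int × Int)) (q : Int × Int) :
    q ∈ (nbrs p).foldl (fun fr q' =>
        if 0 ≤ q'.1 ∧ q'.1 < pvRg grid ∧ 0 ≤ q'.2 ∧ q'.2 < pvCg grid ∧
            cellVal grid q'.1 q'.2 ≠ 0 then
          PySem.Set.add fr q'
        else fr) fr ↔
      q ∈ fr ∨ (q ∈ nbrs p ∧ inRc grid q ∧ cellVal grid q.1 q.2 ≠ 0) := by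
  rw [PySem.List.foldl_ite_eq_foldl_filter
    (fun q' : Int × Int => 0 ≤ q'.1 ∧ q'.1 < pvRg grid ∧ 0 ≤ q'.2 ∧ q'.2 < pvCg grid ∧
      cellVal grid q'.1 q'.2 ≠ 0) (fun fr q' => PySem.Set.add fr q')]
  rw [PySem.Set.mem_foldl_add _ (fun b => b)]
  simp only [List.mem_filter, decide_eq_true_eq, inRc]
  constructor
  · rintro (h | hex)
    · exact Or.inl h
    · obtain ⟨b, hb, hqb⟩ := hex
      subst hqb
      exact Or.inr ⟨hb.1, ⟨hb.2.1, hb.2.2.1, hb.2.2.2.1, hb.2.2.2.2.1⟩, hb.2.2.2.2.2⟩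
  · rintro (h | hc)
    · exact Or.inl h
    · obtain ⟨h1, h2, h3⟩ := hc
      exact Or.inr ⟨q, ⟨h1, h2.1, h2.2.1, h2.2.2.1, h2.2.2.2, h3⟩, rfl⟩

lemma mem_frontierFold (grid : List (List Int)) :
    ∀ (l : List (Int × Int)) (fr : PySem.Set (Int × Int)) (q : Int × Int),
    q ∈ l.foldl (fun fr p =>
        (nbrs p).foldl (fun fr q' =>
          if 0 ≤ q'.1 ∧ q'.1 < pvRg grid ∧ 0 ≤ q'.2 ∧ q'.2 < pvCg grid ∧
              cellVal grid q'.1 q'.2 ≠ 0 then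
            PySem.Set.add fr q'
          else fr) fr) fr ↔
      q ∈ fr ∨ ∃ x ∈ l, q ∈ nbrs x ∧ inRc grid q ∧ cellVal grid q.1 q.2 ≠ 0 := by
  intro l
  induction l with
  | nil => simp
  | cons a t ih =>
    intro fr q
    simp only [List.foldl_cons]
    rw [ih, mem_innerFold]
    constructor
    · rintro ((h | h) | ⟨x, hx, h⟩)
      · exact Or.inl h
      · exact Or.inr ⟨a, List.mem_cons_self .., h⟩
      · exact Or.inr ⟨x, List.mem_cons_of_mem _ hx, h⟩
    · rintro (h | ⟨x, hx, h⟩)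
      · exact Or.inl (Or.inl h)
      · rcases List.mem_cons.mp hx with rfl | hx
        · exact Or.inl (Or.inr h)
        · exact Or.inr ⟨x, hx, h⟩

lemma mem_bStep (grid : List (List Int)) (comp : PySem.Set (Int × Int)) (q : Int × Int) :
    q ∈ bStep grid (pvRg grid) (pvCg grid) comp ↔
      q ∈ comp ∨ ∃ x ∈ comp, q ∈ nbrs x ∧ inRc grid q ∧ cellVal grid q.1 q.2 ≠ 0 := by
  simp only [bStep]
  rw [PySem.Set.mem_union]
  constructor
  · rintro (h | h)
    · exact Or.inl h
    · rcases (mem_frontierFold grid comp PySem.Set.empty q).mp h with h | h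
      · cases h
      · exact Or.inr h
  · rintro (h | h)
    · exact Or.inl h
    · exact Or.inr ((mem_frontierFold grid comp PySem.Set.empty q).mpr (Or.inr h))

lemma bStep_append (grid : List (List Int)) (comp : PySem.Set (Int × Int)) :
    ∃ t, bStep grid (pvRg grid) (pvCg grid) comp = comp ++ t := by
  exact ⟨_, PySem.Set.update_eq_append_filter comp _⟩

lemma bStep_nodup (grid : List (List Int)) (comp : PySem.Set (Int × Int))
    (h : comp.Nodup) : (bStep grid (pvRg grid) (pvCg grid) comp).Nodup := by
  exact PySem.Set.nodup_union comp _ h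

lemma componentB_eq_iterate (grid : List (List Int)) (p : Int × Int) :
    componentB grid (pvRg grid) (pvCg grid) p =
      (bStep grid (pvRg grid) (pvCg grid))^[(pvRg grid * pvCg grid).toNat] [p] := by
  simp only [componentB]
  rw [foldl_ignore_iterate, PySem.List.length_pyRange_one, Int.sub_zero]
  rfl

lemma iterate_ok (grid : List (List Int)) (p : Int × Int) (hp : okc grid p) :
    ∀ k, ∀ q ∈ (bStep grid (pvRg grid) (pvCg grid))^[k] [p], okc grid q := by
  intro k
  induction k with
  | zero =>
    intro q hq
    rcases List.mem_singleton.mp hq with rfl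
    exact hp
  | succ k ih =>
    rw [Function.iterate_succ_apply']
    intro q hq
    rcases (mem_bStep grid _ q).mp hq with h | ⟨x, hx, hn, hin, hnz⟩
    · exact ih q h
    · exact ⟨hin, hnz⟩

lemma iterate_nodup (grid : List (List Int)) (p : Int × Int) :
    ∀ k, ((bStep grid (pvRg grid) (pvCg grid))^[k] [p]).Nodup := by
  intro k
  induction k with
  | zero => simp
  | succ k ih =>
    rw [Function.iterate_succ_apply']
    exact bStep_nodup grid _ ih

lemma iterate_conn (grid : List (List Int)) (p : Int × Int) (hp : okc grid p) :
    ∀ k, ∀ q ∈ (bStep grid (pvRg grid) (pvCg grid))^[k] [p], Connc grid p q := by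
  intro k
  induction k with
  | zero =>
    intro q hq
    rcases List.mem_singleton.mp hq with rfl
    exact Relation.ReflTransGen.refl
  | succ k ih =>
    rw [Function.iterate_succ_apply']
    intro q hq
    rcases (mem_bStep grid _ q).mp hq with h | ⟨x, hx, hn, hin, hnz⟩
    · exact ih q h
    · exact Relation.ReflTransGen.tail (ih x hx) ⟨iterate_ok grid p hp k x hx, ⟨hin, hnz⟩, hn⟩

lemma iterate_mono (grid : List (List Int)) (p : Int × Int) :
    ∀ k, ∀ q ∈ (bStep grid (pvRg grid) (pvCg grid))^[k] [p],
      ∀ j, q ∈ (bStep grid (pvRg grid) (pvCg grid))^[k + j] [p] := by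
  intro k q hq j
  induction j with
  | zero => exact hq
  | succ j ih =>
    have : k + (j + 1) = (k + j) + 1 := rfl
    rw [this, Function.iterate_succ_apply']
    exact (mem_bStep grid _ q).mpr (Or.inl ih)

lemma mem_componentB (grid : List (List Int)) (p : Int × Int) (hp : okc grid p)
    (q : Int × Int) :
    q ∈ componentB grid (pvRg grid) (pvCg grid) p ↔ Connc grid p q := by
  rw [componentB_eq_iterate]
  constructor
  · exact fun h => iterate_conn grid p hp _ q h
  · intro hconn
    set f := bStep grid (pvRg grid) (pvCg grid) with hf
    set N := (pvRg grid * pvCg grid).toNat with hN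
    have hlen : ∀ k, (f^[k] [p]).length ≤ N := by
      intro k
      have hsub : f^[k] [p] ⊆ positionsP grid := by
        intro x hx
        exact (mem_positionsP grid x).mpr (iterate_ok grid p hp k x hx).1
      have := nodup_subset_length (iterate_nodup grid p k) hsub
      rwa [length_positionsP] at this
    have hgrow : ∀ k, f^[k + 1] [p] = f^[k] [p] ∨
        (f^[k] [p]).length < (f^[k + 1] [p]).length := by
      intro k
      rw [Function.iterate_succ_apply']
      obtain ⟨t, ht⟩ := bStep_append grid (f^[k] [p])
      rw [← hf] at ht
      rw [ht]
      cases t with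
      | nil => exact Or.inl (by simp)
      | cons u v => right; simp [List.length_append]
    have hstable : ∃ k, k ≤ N ∧ f^[k + 1] [p] = f^[k] [p] := by
      by_contra hcon
      push_neg at hcon
      have hmono : ∀ k, k ≤ N → k + 1 ≤ (f^[k] [p]).length := by
        intro k
        induction k with
        | zero => intro _; simp
        | succ k ih =>
          intro hk
          have h1 := ih (Nat.le_of_succ_le hk)
          rcases hgrow k with he | hlt
          · exact absurd he (hcon k (Nat.le_of_succ_le hk))
          · omega
      have := hmono N (Nat.le_refl N)
      have := hlen N
      omega
    obtain ⟨k, hkN, hfix⟩ := hstable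
    have hconst : ∀ j, f^[k + j] [p] = f^[k] [p] := by
      intro j
      induction j with
      | zero => rfl
      | succ j ih =>
        have he : k + (j + 1) = (k + j) + 1 := rfl
        rw [he, Function.iterate_succ_apply', ih]
        have h2 := hfix
        rw [Function.iterate_succ_apply'] at h2
        exact h2
    have hclosed : ∀ x ∈ f^[k] [p], ∀ r, adjc grid x r → r ∈ f^[k] [p] := by
      intro x hx r hadj
      have hr : r ∈ f^[k + 1] [p] := by
        rw [Function.iterate_succ_apply']
        exact (mem_bStep grid _ r).mpr (Or.inr ⟨x, hx, hadj.2.2, hadj.2.1.1, hadj.2.1.2⟩)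
      rwa [hfix] at hr
    have hNk : f^[N] [p] = f^[k] [p] := by
      have := hconst (N - k)
      rwa [Nat.add_sub_cancel' hkN] at this
    rw [hNk]
    have hconn' : Relation.ReflTransGen (adjc grid) p q := hconn
    clear hconn
    induction hconn' with
    | refl =>
      have h0 : p ∈ f^[0] [p] := by simp
      have hmk := iterate_mono grid p 0 p h0 k
      rw [Nat.zero_add] at hmk
      exact hmk
    | tail h1 hadj ih => exact hclosed _ ih _ hadj

lemma componentB_nodup (grid : List (List Int)) (p : Int × Int) :
    (componentB grid (pvRg grid) (pvCg grid) p).Nodup := by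
  rw [componentB_eq_iterate]
  exact iterate_nodup grid p _

lemma componentB_ne_nil (grid : List (List Int)) (p : Int × Int) :
    componentB grid (pvRg grid) (pvCg grid) p ≠ [] := by
  rw [componentB_eq_iterate]
  have h0 : p ∈ (bStep grid (pvRg grid) (pvCg grid))^[0] [p] := by simp
  have := iterate_mono grid p 0 p h0 ((pvRg grid * pvCg grid).toNat)
  rw [Nat.zero_add] at this
  exact List.ne_nil_of_mem this

-- canonical cell test characterisation
lemma canonP_iff (grid : List (List Int)) (p : Int × Int) (hp : okc grid p) :
    canonP grid p ↔ ∀ q, Connc grid p q → ¬ lexLt q p := by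
  have hml := mem_componentB grid p hp
  obtain ⟨x, t, he⟩ := List.exists_cons_of_ne_nil (componentB_ne_nil grid p)
  constructor
  · rintro ⟨-, hmin⟩ q hconn hlt
    have hq : q ∈ componentB grid (pvRg grid) (pvCg grid) p := (hml q).mpr hconn
    rw [he] at hq
    have hnot := lexMinP_min x t q hq
    rw [← he, hmin] at hnot
    exact hnot hlt
  · intro hall
    refine ⟨hp.2, ?_⟩
    have hmem : lexMinP (x :: t) ∈ componentB grid (pvRg grid) (pvCg grid) p := by
      rw [he]; exact lexMinP_mem x t
    have hconnm : Connc grid p (lexMinP (x :: t)) := (hml _).mp hmem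
    have h1 : ¬ lexLt (lexMinP (x :: t)) p := hall _ hconnm
    have hpmem : p ∈ x :: t := by
      rw [← he]; exact (hml p).mpr Relation.ReflTransGen.refl
    have h2 : ¬ lexLt p (lexMinP (x :: t)) := lexMinP_min x t p hpmem
    rw [he]
    rcases hLm : lexMinP (x :: t) with ⟨m1, m2⟩
    rw [hLm] at h1 h2
    obtain ⟨p1, p2⟩ := p
    simp only [lexLt, Prod.mk.injEq] at h1 h2 ⊢
    omega

-- ===== A-side: the stack flood fill visits exactly one component =====
lemma foldl_push_mem {α β : Type} (app : β → α) (P : α → Prop) [DecidablePred P] :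
    ∀ (ds : List β) (rest : List α) (q : α),
      q ∈ ds.foldl (fun st d => if P (app d) then app d :: st else st) rest ↔
        q ∈ rest ∨ ∃ d ∈ ds, P (app d) ∧ q = app d := by
  intro ds
  induction ds with
  | nil => simp
  | cons d t ih =>
    intro rest q
    simp only [List.foldl_cons]
    rw [ih]
    by_cases hP : P (app d)
    · rw [if_pos hP]
      simp only [List.mem_cons]
      constructor
      · rintro ((rfl | h) | ⟨e, he, hPe, heq⟩)
        · exact Or.inr ⟨d, Or.inl rfl, hP, rfl⟩
        · exact Or.inl h
        · exact Or.inr ⟨e, Or.inr he, hPe, heq⟩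
      · rintro (h | ⟨e, he, hPe, heq⟩)
        · exact Or.inl (Or.inr h)
        · rcases he with rfl | he
          · exact Or.inl (Or.inl heq)
          · exact Or.inr ⟨e, he, hPe, heq⟩
    · rw [if_neg hP]
      constructor
      · rintro (h | ⟨e, he, hPe, heq⟩)
        · exact Or.inl h
        · exact Or.inr ⟨e, List.mem_cons_of_mem _ he, hPe, heq⟩
      · rintro (h | ⟨e, he, hPe, heq⟩)
        · exact Or.inl h
        · rcases List.mem_cons.mp he with rfl | he
          · exact absurd hPe hP
          · exact Or.inr ⟨e, he, hPe, heq⟩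

lemma foldl_push_len {α β : Type} (app : β → α) (P : α → Prop) [DecidablePred P] :
    ∀ (ds : List β) (rest : List α),
      (ds.foldl (fun st d => if P (app d) then app d :: st else st) rest).length ≤
        rest.length + ds.length := by
  intro ds
  induction ds with
  | nil => simp
  | cons d t ih =>
    intro rest
    simp only [List.foldl_cons, List.length_cons]
    refine le_trans (ih _) ?_
    split_ifs <;> simp <;> omega

lemma mem_pushFold (grid : List (List Int)) (cr cc : Int)
    (visited' : PySem.Set (Int × Int)) (rest : List (Int × Int)) (q : Int × Int) :
    q ∈ [((-1 : Int), (0 : Int)), (1, 0), (0, -1), (0, 1)].foldl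
        (fun st d =>
          let nr := cr + d.1
          let nc := cc + d.2
          if 0 ≤ nr ∧ nr < pvRg grid ∧ 0 ≤ nc ∧ nc < pvCg grid ∧ (nr, nc) ∉ visited' ∧
              cellVal grid nr nc ≠ 0 then
            (nr, nc) :: st
          else st) rest ↔
      q ∈ rest ∨ (q ∈ nbrs (cr, cc) ∧ inRc grid q ∧ q ∉ visited' ∧
        cellVal grid q.1 q.2 ≠ 0) := by
  refine Iff.trans (foldl_push_mem (fun d : Int × Int => (cr + d.1, cc + d.2))
    (fun x : Int × Int => 0 ≤ x.1 ∧ x.1 < pvRg grid ∧ 0 ≤ x.2 ∧ x.2 < pvCg grid ∧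
      x ∉ visited' ∧ cellVal grid x.1 x.2 ≠ 0)
    [((-1 : Int), (0 : Int)), (1, 0), (0, -1), (0, 1)] rest q) ?_
  obtain ⟨q1, q2⟩ := q
  simp only [List.mem_cons, List.not_mem_nil, or_false, inRc, nbrs, Prod.mk.injEq]
  constructor
  · rintro (h | ⟨d, hd, hP, heq⟩)
    · exact Or.inl h
    · right
      rcases hd with rfl | rfl | rfl | rfl
      all_goals
        obtain ⟨hA, hB, hC, hD, hE, hF⟩ := hP
        simp only [Prod.mk.injEq] at heq
        obtain ⟨he1, he2⟩ := heq
        rw [← he1, ← he2] at hE hF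
        exact ⟨by omega, ⟨by omega, by omega, by omega, by omega⟩, hE, hF⟩
  · rintro (h | ⟨hnb, hin, hnv, hnz⟩)
    · exact Or.inl h
    · right
      obtain ⟨hi1, hi2, hi3, hi4⟩ := hin
      rcases hnb with ⟨he1, he2⟩ | ⟨he1, he2⟩ | ⟨he1, he2⟩ | ⟨he1, he2⟩
      · refine ⟨((-1 : Int), (0 : Int)), Or.inl rfl,
          ⟨by omega, by omega, by omega, by omega, ?_, ?_⟩,
          by simp only [Prod.mk.injEq]; omega⟩
        · rw [show ((cr + -1 : Int), (cc + 0 : Int)) = (q1, q2) from by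
            simp only [Prod.mk.injEq]; omega]
          exact hnv
        · rw [show (cr + -1 : Int) = q1 from by omega, show (cc + 0 : Int) = q2 from by omega]
          exact hnz
      · refine ⟨((1 : Int), (0 : Int)), Or.inr (Or.inl rfl),
          ⟨by omega, by omega, by omega, by omega, ?_, ?_⟩,
          by simp only [Prod.mk.injEq]; omega⟩
        · rw [show ((cr + 1 : Int), (cc + 0 : Int)) = (q1, q2) from by
            simp only [Prod.mk.injEq]; omega]
          exact hnv
        · rw [show (cr + 1 : Int) = q1 from by omega, show (cc + 0 : Int) = q2 from by omega]
          exact hnz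
      · refine ⟨((0 : Int), (-1 : Int)), Or.inr (Or.inr (Or.inl rfl)),
          ⟨by omega, by omega, by omega, by omega, ?_, ?_⟩,
          by simp only [Prod.mk.injEq]; omega⟩
        · rw [show ((cr + 0 : Int), (cc + -1 : Int)) = (q1, q2) from by
            simp only [Prod.mk.injEq]; omega]
          exact hnv
        · rw [show (cr + 0 : Int) = q1 from by omega, show (cc + -1 : Int) = q2 from by omega]
          exact hnz
      · refine ⟨((0 : Int), (1 : Int)), Or.inr (Or.inr (Or.inr rfl)),
          ⟨by omega, by omega, by omega, by omega, ?_, ?_⟩,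
          by simp only [Prod.mk.injEq]; omega⟩
        · rw [show ((cr + 0 : Int), (cc + 1 : Int)) = (q1, q2) from by
            simp only [Prod.mk.injEq]; omega]
          exact hnv
        · rw [show (cr + 0 : Int) = q1 from by omega, show (cc + 1 : Int) = q2 from by omega]
          exact hnz

lemma len_pushFold (grid : List (List Int)) (cr cc : Int)
    (visited' : PySem.Set (Int × Int)) (rest : List (Int × Int)) :
    ([((-1 : Int), (0 : Int)), (1, 0), (0, -1), (0, 1)].foldl
        (fun st d =>
          let nr := cr + d.1
          let nc := cc + d.2
          if 0 ≤ nr ∧ nr < pvRg grid ∧ 0 ≤ nc ∧ nc < pvCg grid ∧ (nr, nc) ∉ visited' ∧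
              cellVal grid nr nc ≠ 0 then
            (nr, nc) :: st
          else st) rest).length ≤ rest.length + 4 := by
  refine le_trans (foldl_push_len (fun d : Int × Int => (cr + d.1, cc + d.2))
    (fun x : Int × Int => 0 ≤ x.1 ∧ x.1 < pvRg grid ∧ 0 ≤ x.2 ∧ x.2 < pvCg grid ∧
      x ∉ visited' ∧ cellVal grid x.1 x.2 ≠ 0)
    [((-1 : Int), (0 : Int)), (1, 0), (0, -1), (0, 1)] rest) (by simp)

lemma dfs_main (grid : List (List Int)) :
    ∀ (fuel : Nat) (visited : PySem.Set (Int × Int)) (comp stack : List (Int × Int)),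
      visited.Nodup → (∀ x ∈ visited, inRc grid x) → (∀ x ∈ stack, inRc grid x) →
      5 * ((pvRg grid * pvCg grid).toNat - visited.length) + stack.length ≤ fuel →
      ∃ d, dfsLoop grid (pvRg grid) (pvCg grid) fuel visited comp stack =
          (visited ++ d, comp ++ d, []) ∧
        (visited ++ d).Nodup ∧ (∀ x ∈ d, okc grid x) ∧
        (∀ x ∈ stack, cellVal grid x.1 x.2 ≠ 0 → x ∈ visited ++ d) ∧
        (∀ x ∈ d, ∀ q, okc grid q → q ∈ nbrs x → q ∈ visited ++ d) ∧
        (∀ x ∈ d, ∃ s ∈ stack, okc grid s ∧ Connc grid s x) := by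
  intro fuel
  induction fuel with
  | zero =>
    intro visited comp stack hnd hinV hinS hfuel
    have hs : stack = [] := List.eq_nil_of_length_eq_zero (by omega)
    subst hs
    refine ⟨[], by simp [dfsLoop], by simpa using hnd, by simp, by simp, by simp, by simp⟩
  | succ fuel ih =>
    intro visited comp stack hnd hinV hinS hfuel
    cases stack with
    | nil =>
      refine ⟨[], by simp [dfsLoop], by simpa using hnd, by simp, by simp, by simp, by simp⟩
    | cons hd rest =>
      obtain ⟨cr, cc⟩ := hd
      by_cases hskip : (cr, cc) ∈ visited ∨ cellVal grid cr cc = 0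
      · have hstep : dfsLoop grid (pvRg grid) (pvCg grid) (fuel + 1) visited comp
            ((cr, cc) :: rest) = dfsLoop grid (pvRg grid) (pvCg grid) fuel visited comp rest := by
          simp only [dfsLoop]
          rw [if_pos hskip]
        rw [hstep]
        obtain ⟨d, hres, hnd', hok', hstk', hcl', hreach'⟩ :=
          ih visited comp rest hnd hinV (fun x hx => hinS x (List.mem_cons_of_mem _ hx))
            (by simp only [List.length_cons] at hfuel; omega)
        refine ⟨d, hres, hnd', hok', ?_, hcl', ?_⟩
        · intro x hx hnzx
          rcases List.mem_cons.mp hx with rfl | hx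
          · rcases hskip with h | h
            · exact List.mem_append.mpr (Or.inl h)
            · exact absurd h hnzx
          · exact hstk' x hx hnzx
        · intro x hx
          obtain ⟨sv, hs, hoks, hconn⟩ := hreach' x hx
          exact ⟨sv, List.mem_cons_of_mem _ hs, hoks, hconn⟩
      · push_neg at hskip
        obtain ⟨hnvis, hnz⟩ := hskip
        have hincc : inRc grid (cr, cc) := hinS _ (List.mem_cons_self ..)
        have hokcc : okc grid (cr, cc) := ⟨hincc, hnz⟩
        have hadd : PySem.Set.add visited (cr, cc) = visited ++ [(cr, cc)] :=
          PySem.Set.add_of_not_mem hnvis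
        have hnd1 : (visited ++ [(cr, cc)]).Nodup := by
          rw [List.nodup_append]
          refine ⟨hnd, List.nodup_singleton _, ?_⟩
          intro a ha b hb
          rcases List.mem_singleton.mp hb with rfl
          intro he
          rw [he] at ha
          exact hnvis ha
        have hsub1 : (visited ++ [(cr, cc)]) ⊆ positionsP grid := by
          intro x hx
          rcases List.mem_append.mp hx with hx | hx
          · exact (mem_positionsP grid x).mpr (hinV x hx)
          · rcases List.mem_singleton.mp hx with rfl
            exact (mem_positionsP grid _).mpr hincc
        have hlt : visited.length + 1 ≤ (pvRg grid * pvCg grid).toNat := by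
          have h := nodup_subset_length hnd1 hsub1
          rw [length_positionsP] at h
          simpa using h
        have hstep : dfsLoop grid (pvRg grid) (pvCg grid) (fuel + 1) visited comp
            ((cr, cc) :: rest) =
            dfsLoop grid (pvRg grid) (pvCg grid) fuel (visited ++ [(cr, cc)])
              (comp ++ [(cr, cc)])
              ([((-1 : Int), (0 : Int)), (1, 0), (0, -1), (0, 1)].foldl
                (fun st d =>
                  if 0 ≤ cr + d.1 ∧ cr + d.1 < pvRg grid ∧ 0 ≤ cc + d.2 ∧
                      cc + d.2 < pvCg grid ∧
                      (cr + d.1, cc + d.2) ∉ visited ++ [(cr, cc)] ∧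
                      cellVal grid (cr + d.1) (cc + d.2) ≠ 0 then
                    (cr + d.1, cc + d.2) :: st
                  else st) rest) := by
          simp only [dfsLoop]
          rw [if_neg (by push_neg; exact ⟨hnvis, hnz⟩), hadd]
        rw [hstep]
        have hinV1 : ∀ x ∈ visited ++ [(cr, cc)], inRc grid x := by
          intro x hx
          rcases List.mem_append.mp hx with hx | hx
          · exact hinV x hx
          · rcases List.mem_singleton.mp hx with rfl
            exact hincc
        have hinS1 : ∀ x ∈ ([((-1 : Int), (0 : Int)), (1, 0), (0, -1), (0, 1)].foldl
            (fun st d =>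
              if 0 ≤ cr + d.1 ∧ cr + d.1 < pvRg grid ∧ 0 ≤ cc + d.2 ∧
                  cc + d.2 < pvCg grid ∧
                  (cr + d.1, cc + d.2) ∉ visited ++ [(cr, cc)] ∧
                  cellVal grid (cr + d.1) (cc + d.2) ≠ 0 then
                (cr + d.1, cc + d.2) :: st
              else st) rest), inRc grid x := by
          intro x hx
          rcases (mem_pushFold grid cr cc (visited ++ [(cr, cc)]) rest x).mp hx with h | h
          · exact hinS x (List.mem_cons_of_mem _ h)
          · exact h.2.1
        have hlen1 := len_pushFold grid cr cc (visited ++ [(cr, cc)]) rest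
        obtain ⟨d', hres, hnd', hok', hstk', hcl', hreach'⟩ :=
          ih (visited ++ [(cr, cc)]) (comp ++ [(cr, cc)]) _ hnd1 hinV1 hinS1
            (by
              simp only [List.length_append, List.length_singleton, List.length_cons] at hfuel hlen1 ⊢
              omega)
        have hglue : ∀ l : List (Int × Int), l ++ (cr, cc) :: d' = (l ++ [(cr, cc)]) ++ d' := by
          intro l; simp
        refine ⟨(cr, cc) :: d', ?_, ?_, ?_, ?_, ?_, ?_⟩
        · rw [hres, hglue visited, hglue comp]
        · rw [hglue visited]; exact hnd'
        · intro x hx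
          rcases List.mem_cons.mp hx with rfl | hx
          · exact hokcc
          · exact hok' x hx
        · intro x hx hnzx
          rw [hglue visited]
          rcases List.mem_cons.mp hx with rfl | hx
          · exact List.mem_append.mpr (Or.inl (List.mem_append.mpr (Or.inr (List.mem_singleton.mpr rfl))))
          · refine hstk' x ?_ hnzx
            exact (mem_pushFold grid cr cc (visited ++ [(cr, cc)]) rest x).mpr (Or.inl hx)
        · intro x hx q hq hnb
          rw [hglue visited]
          rcases List.mem_cons.mp hx with rfl | hx
          · by_cases hqv : q ∈ visited ++ [(cr, cc)]
            · exact List.mem_append.mpr (Or.inl hqv)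
            · refine hstk' q ?_ hq.2
              exact (mem_pushFold grid cr cc (visited ++ [(cr, cc)]) rest q).mpr
                (Or.inr ⟨hnb, hq.1, hqv, hq.2⟩)
          · exact hcl' x hx q hq hnb
        · intro x hx
          rcases List.mem_cons.mp hx with rfl | hx
          · exact ⟨(cr, cc), List.mem_cons_self .., hokcc, Relation.ReflTransGen.refl⟩
          · obtain ⟨sv, hsv, hoksv, hconn⟩ := hreach' x hx
            rcases (mem_pushFold grid cr cc (visited ++ [(cr, cc)]) rest sv).mp hsv with h | h
            · exact ⟨sv, List.mem_cons_of_mem _ h, hoksv, hconn⟩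
            · refine ⟨(cr, cc), List.mem_cons_self .., hokcc, ?_⟩
              exact Relation.ReflTransGen.head ⟨hokcc, ⟨h.2.1, h.2.2.2⟩, h.1⟩ hconn

lemma in_closed (grid : List (List Int)) (V : PySem.Set (Int × Int))
    (hcl : ∀ v ∈ V, ∀ q, okc grid q → q ∈ nbrs v → q ∈ V)
    {p x : Int × Int} (hp : p ∈ V) (h : Connc grid p x) : x ∈ V := by
  have h' : Relation.ReflTransGen (adjc grid) p x := h
  clear h
  induction h' with
  | refl => exact hp
  | tail h1 hadj ih => exact hcl _ ih _ hadj.2.1 hadj.2.2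

lemma notin_closed (grid : List (List Int)) (V : PySem.Set (Int × Int))
    (hcl : ∀ v ∈ V, ∀ q, okc grid q → q ∈ nbrs v → q ∈ V)
    {p q : Int × Int} (hp : p ∉ V) (h : Connc grid p q) : q ∉ V := by
  intro hqV
  exact hp (in_closed grid V hcl hqV (connc_symm grid h))

lemma dfs_call (grid : List (List Int)) (V : PySem.Set (Int × Int)) (p : Int × Int)
    (hnd : V.Nodup) (hin : ∀ x ∈ V, inRc grid x)
    (hcl : ∀ v ∈ V, ∀ q, okc grid q → q ∈ nbrs v → q ∈ V)
    (hp : okc grid p) (hpV : p ∉ V) :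
    ∃ d, dfsLoop grid (pvRg grid) (pvCg grid)
        (5 * (pvRg grid * pvCg grid).toNat + 1) V [] [p] = (V ++ d, d, []) ∧
      d ≠ [] ∧ d.Nodup ∧ (V ++ d).Nodup ∧ (∀ x ∈ d, okc grid x) ∧
      (∀ x, x ∈ d ↔ Connc grid p x) ∧
      (∀ v ∈ V ++ d, ∀ q, okc grid q → q ∈ nbrs v → q ∈ V ++ d) := by
  obtain ⟨d, hres, hndVD, hok, hstk, hcl2, hreach⟩ :=
    dfs_main grid (5 * (pvRg grid * pvCg grid).toNat + 1) V [] [p] hnd hin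
      (by intro x hx; rcases List.mem_singleton.mp hx with rfl; exact hp.1)
      (by simp only [List.length_singleton]; omega)
  have hpd : p ∈ d := by
    have h1 := hstk p (List.mem_singleton.mpr rfl) hp.2
    rcases List.mem_append.mp h1 with h | h
    · exact absurd h hpV
    · exact h
  have hall : ∀ y, Connc grid p y → y ∈ V ++ d := by
    intro y hy
    have h' : Relation.ReflTransGen (adjc grid) p y := hy
    clear hy
    induction h' with
    | refl => exact hstk p (List.mem_singleton.mpr rfl) hp.2
    | @tail b c h1 hadj ih =>
      have hbV : b ∉ V := notin_closed grid V hcl hpV h1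
      have hbd : b ∈ d := by
        rcases List.mem_append.mp ih with h | h
        · exact absurd h hbV
        · exact h
      exact hcl2 b hbd c hadj.2.1 hadj.2.2
  have hmem : ∀ x, x ∈ d ↔ Connc grid p x := by
    intro x
    constructor
    · intro hx
      obtain ⟨sv, hsv, _, hconn⟩ := hreach x hx
      rcases List.mem_singleton.mp hsv with rfl
      exact hconn
    · intro hconn
      have hxnV : x ∉ V := notin_closed grid V hcl hpV hconn
      rcases List.mem_append.mp (hall x hconn) with h | h
      · exact absurd h hxnV
      · exact h
  refine ⟨d, by simpa using hres, List.ne_nil_of_mem hpd,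
    (List.nodup_append.mp hndVD).2.1, hndVD, hok, hmem, ?_⟩
  intro v hv q hq hnb
  rcases List.mem_append.mp hv with h | h
  · exact List.mem_append.mpr (Or.inl (hcl v h q hq hnb))
  · exact hcl2 v h q hq hnb

-- ===== the scan =====
lemma scan_main (grid : List (List Int)) :
    ∀ (ps done : List (Int × Int)) (V : PySem.Set (Int × Int))
      (blocks : List (List (Int × Int))),
      positionsP grid = done ++ ps →
      V.Nodup → (∀ x ∈ V, inRc grid x) →
      (∀ v ∈ V, ∀ q, okc grid q → q ∈ nbrs v → q ∈ V) →
      (∀ x, x ∈ V ↔ ∃ s ∈ done, okc grid s ∧ Connc grid s x) →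
      ∃ (V' : PySem.Set (Int × Int)) (nbs : List (List (Int × Int))),
        ps.foldl (scanStep grid) (V, blocks) = (V', blocks ++ nbs) ∧
        List.Forall₂ (fun l p => l ≠ [] ∧ l.Nodup ∧
            ∀ x, x ∈ l ↔ x ∈ componentB grid (pvRg grid) (pvCg grid) p)
          nbs (ps.filter (fun p => decide (canonP grid p))) := by
  intro ps
  induction ps with
  | nil =>
    intro done V blocks hpos hnd hin hcl hchar
    exact ⟨V, [], by simp, by simp⟩
  | cons p ps ih =>
    intro done V blocks hpos hnd hin hcl hchar
    have hppos : p ∈ positionsP grid := by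
      rw [hpos]; exact List.mem_append.mpr (Or.inr (List.mem_cons_self ..))
    have hinp : inRc grid p := (mem_positionsP grid p).mp hppos
    have hpw := pairwise_positionsP grid
    rw [hpos] at hpw
    obtain ⟨hpwd, hpwp, hcross⟩ := List.pairwise_append.mp hpw
    have hdone_lt : ∀ s ∈ done, lexLt s p := fun s hs => hcross s hs p (List.mem_cons_self ..)
    have hearlier : ∀ q, inRc grid q → lexLt q p → q ∈ done := by
      intro q hq hlt
      have hqpos : q ∈ positionsP grid := (mem_positionsP grid q).mpr hq
      rw [hpos] at hqpos
      rcases List.mem_append.mp hqpos with h | h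
      · exact h
      · rcases List.mem_cons.mp h with rfl | h
        · exact absurd hlt (by obtain ⟨a, b⟩ := q; simp only [lexLt]; omega)
        · have hpq : lexLt p q := (List.pairwise_cons.mp hpwp).1 q h
          exact absurd hlt
            (by obtain ⟨a, b⟩ := p; obtain ⟨c, e⟩ := q; simp only [lexLt] at hpq ⊢; omega)
    simp only [List.foldl_cons]
    by_cases hz : cellVal grid p.1 p.2 = 0
    · have hstep : scanStep grid (V, blocks) p = (V, blocks) := by
        simp only [scanStep]
        rw [if_neg (fun hcon => hcon.1 hz)]
      rw [hstep]
      have hncan : ¬ canonP grid p := fun hcan => hcan.1 hz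
      have hchar' : ∀ x, x ∈ V ↔ ∃ s ∈ done ++ [p], okc grid s ∧ Connc grid s x := by
        intro x
        rw [hchar x]
        constructor
        · rintro ⟨sv, hs, hok2, hc2⟩
          exact ⟨sv, List.mem_append.mpr (Or.inl hs), hok2, hc2⟩
        · rintro ⟨sv, hs, hok2, hc2⟩
          rcases List.mem_append.mp hs with hs | hs
          · exact ⟨sv, hs, hok2, hc2⟩
          · rcases List.mem_singleton.mp hs with rfl
            exact absurd hok2.2 (by simpa using hz)
      obtain ⟨V', nbs, hfold, hf2⟩ := ih (done ++ [p]) V blocks (by rw [hpos]; simp)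
        hnd hin hcl hchar'
      refine ⟨V', nbs, hfold, ?_⟩
      rw [List.filter_cons_of_neg (by simpa using hncan)]
      exact hf2
    · by_cases hv : p ∈ V
      · have hokp : okc grid p := ⟨hinp, hz⟩
        have hstep : scanStep grid (V, blocks) p = (V, blocks) := by
          simp only [scanStep]
          rw [if_neg (fun hcon => hcon.2 hv)]
        rw [hstep]
        obtain ⟨sv, hs, hoks, hconn⟩ := (hchar p).mp hv
        have hncan : ¬ canonP grid p := by
          intro hcan
          exact (canonP_iff grid p hokp).mp hcan sv (connc_symm grid hconn) (hdone_lt sv hs)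
        have hchar' : ∀ x, x ∈ V ↔ ∃ s ∈ done ++ [p], okc grid s ∧ Connc grid s x := by
          intro x
          rw [hchar x]
          constructor
          · rintro ⟨s2, hs2, hok2, hc2⟩
            exact ⟨s2, List.mem_append.mpr (Or.inl hs2), hok2, hc2⟩
          · rintro ⟨s2, hs2, hok2, hc2⟩
            rcases List.mem_append.mp hs2 with h2 | h2
            · exact ⟨s2, h2, hok2, hc2⟩
            · rcases List.mem_singleton.mp h2 with rfl
              exact (hchar x).mp (in_closed grid V hcl hv hc2)
        obtain ⟨V', nbs, hfold, hf2⟩ := ih (done ++ [p]) V blocks (by rw [hpos]; simp)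
          hnd hin hcl hchar'
        refine ⟨V', nbs, hfold, ?_⟩
        rw [List.filter_cons_of_neg (by simpa using hncan)]
        exact hf2
      · have hokp : okc grid p := ⟨hinp, hz⟩
        have hcan : canonP grid p := by
          rw [canonP_iff grid p hokp]
          intro q hconn hlt
          have hne : q ≠ p := by
            intro he
            rw [he] at hlt
            obtain ⟨a, b⟩ := p
            simp only [lexLt] at hlt
            omega
          have hqok : okc grid q := okc_of_connc_ne grid hconn hne
          have hqdone : q ∈ done := hearlier q hqok.1 hlt
          exact hv ((hchar p).mpr ⟨q, hqdone, hqok, connc_symm grid hconn⟩)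
        obtain ⟨d, hres, hdne, hdnd, hndVD, hdok, hdmem, hclVD⟩ :=
          dfs_call grid V p hnd hin hcl hokp hv
        have hstep : scanStep grid (V, blocks) p = (V ++ d, blocks ++ [d]) := by
          simp only [scanStep]
          rw [if_pos ⟨hz, hv⟩, hres]
        rw [hstep]
        have hinVD : ∀ x ∈ V ++ d, inRc grid x := by
          intro x hx
          rcases List.mem_append.mp hx with h | h
          · exact hin x h
          · exact (hdok x h).1
        have hchar' : ∀ x, x ∈ V ++ d ↔ ∃ s ∈ done ++ [p], okc grid s ∧ Connc grid s x := by
          intro x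
          constructor
          · intro hx
            rcases List.mem_append.mp hx with h | h
            · obtain ⟨s2, hs2, ho2, hc2⟩ := (hchar x).mp h
              exact ⟨s2, List.mem_append.mpr (Or.inl hs2), ho2, hc2⟩
            · exact ⟨p, List.mem_append.mpr (Or.inr (List.mem_singleton.mpr rfl)), hokp,
                (hdmem x).mp h⟩
          · rintro ⟨s2, hs2, ho2, hc2⟩
            rcases List.mem_append.mp hs2 with h2 | h2
            · exact List.mem_append.mpr (Or.inl ((hchar x).mpr ⟨s2, h2, ho2, hc2⟩))
            · rcases List.mem_singleton.mp h2 with rfl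
              exact List.mem_append.mpr (Or.inr ((hdmem x).mpr hc2))
        obtain ⟨V', nbs, hfold, hf2⟩ := ih (done ++ [p]) (V ++ d) (blocks ++ [d])
          (by rw [hpos]; simp) hndVD hinVD hclVD hchar'
        refine ⟨V', d :: nbs, ?_, ?_⟩
        · rw [hfold]
          simp
        · rw [List.filter_cons_of_pos (by simpa using hcan)]
          exact List.Forall₂.cons
            ⟨hdne, hdnd, fun x => (hdmem x).trans (mem_componentB grid p hokp x).symm⟩ hf2

lemma ports_eq (grid : List (List Int)) :
    solve_e50d258f grid = solve_e50d258f_alt grid := by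
  have hA : solve_e50d258f grid =
      (((positionsP grid).foldl (scanStep grid) (PySem.Set.empty, [])).2.foldl
        (fun st block => selStep grid st block)
        ((none : Option (List (List Int))), (-1 : Int))).1 :=
    congrArg (fun X : PySem.Set (Int × Int) × List (List (Int × Int)) =>
      (X.2.foldl (fun st block => selStep grid st block)
        ((none : Option (List (List Int))), (-1 : Int))).1)
      (nested_foldl grid (scanStep grid) (PySem.Set.empty, []))
  have hB : solve_e50d258f_alt grid =
      ((positionsP grid).foldl (selBStep grid)
        ((none : Option (List (List Int))), (-1 : Int))).1 :=
    congrArg (fun X : Option (List (List Int)) × Int => X.1)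
      (nested_foldl grid (selBStep grid) ((none : Option (List (List Int))), (-1 : Int)))
  rw [hA, hB]
  obtain ⟨V', nbs, hfold, hf2⟩ := scan_main grid (positionsP grid) [] PySem.Set.empty []
    rfl (by simp [PySem.Set.empty]) (by simp [PySem.Set.empty]) (by simp [PySem.Set.empty])
    (by intro x; simp [PySem.Set.empty])
  rw [hfold]
  have hBfun : (selBStep grid) = (fun st p => if canonP grid p then
      selStep grid st (componentB grid (pvRg grid) (pvCg grid) p) else st) := by
    funext st p
    by_cases h1 : cellVal grid p.1 p.2 ≠ 0 <;>
      by_cases h2 : lexMinP (componentB grid (pvRg grid) (pvCg grid) p) = p <;>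
      simp [selBStep, canonP, h1, h2]
  rw [hBfun, PySem.List.foldl_ite_eq_foldl_filter (canonP grid)
    (fun st p => selStep grid st (componentB grid (pvRg grid) (pvCg grid) p))]
  have hcongr := foldl_forall2_congr
    (fun (l : List (Int × Int)) (p : Int × Int) => l ≠ [] ∧ l.Nodup ∧
      ∀ x, x ∈ l ↔ x ∈ componentB grid (pvRg grid) (pvCg grid) p)
    (fun st block => selStep grid st block)
    (fun st p => selStep grid st (componentB grid (pvRg grid) (pvCg grid) p))
    (fun st a b hR => selStep_congr grid st hR.1 (componentB_ne_nil grid b) hR.2.1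
      (componentB_nodup grid b) hR.2.2)
    hf2 ((none : Option (List (List Int))), (-1 : Int))
  simp only [List.nil_append]
  rw [hcongr]

-- ===== VERDICT (by name: the statement is the Claim_ definition above) =====
theorem solve_e50d258f_spec : Claim_equal_solve_e50d258f := by
  intro grid _ _
  unfold Spec_solve_e50d258f
  exact ports_eq grid
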